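-- pv_equiv track=rewrite | github.com/RafyAmgadBenjamin/problem_solving | cp_environment/uva_burger_time.py | cal_min_dis
-- ===== SOURCE A (Python) =====
-- def cal_min_dis(road_map, road_length):
--     min_dist = 99999999999
--     count = 0
--     prev_letter = ""
--     for i in range(road_length):
--         if "Z" in road_map[i]:
--             return 0
--         if road_map[i] == "." and prev_letter != "":
--             count += 1
--
--         if road_map[i] == "R" or road_map[i] == "D":
--             # This is the first time
--             if prev_letter == "":
--                 prev_letter = road_map[i]
--             elif prev_letter == road_map[i]:
--                 # in case R ... R or D ... D
--                 count = 0
--             else: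
--                 if min_dist > count + 1:
--                     min_dist = count + 1
--                 prev_letter = road_map[i]
--                 count = 0
--     return min_dist
-- ===== SOURCE B (Python) =====
-- def cal_min_dis(road_map, road_length):
--     cells = road_map[:max(0, road_length)]
--     if any("Z" in c for c in cells):
--         return 0
--     markers = []
--     dots = 0
--     for c in cells:
--         if c == "R" or c == "D":
--             markers.append((c, dots))
--             dots = 0
--         elif c == ".":
--             dots += 1
--     best = 99999999999
--     for (l1, _), (l2, d2) in zip(markers, markers[1:]):
--         if l1 != l2 and d2 + 1 < best:
--             best = d2 + 1
--     return best
-- ===== Notes on version B (the rewrite author's own statement) =====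
-- stated objective: alternative
-- what changed: Single stateful scan with early return replaced by three phases: a whole-prefix 'Z' membership check, materialising a list of (marker, dots-since-previous-marker) pairs, then a reduction over adjacent pairs of that list.
import Mathlib
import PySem

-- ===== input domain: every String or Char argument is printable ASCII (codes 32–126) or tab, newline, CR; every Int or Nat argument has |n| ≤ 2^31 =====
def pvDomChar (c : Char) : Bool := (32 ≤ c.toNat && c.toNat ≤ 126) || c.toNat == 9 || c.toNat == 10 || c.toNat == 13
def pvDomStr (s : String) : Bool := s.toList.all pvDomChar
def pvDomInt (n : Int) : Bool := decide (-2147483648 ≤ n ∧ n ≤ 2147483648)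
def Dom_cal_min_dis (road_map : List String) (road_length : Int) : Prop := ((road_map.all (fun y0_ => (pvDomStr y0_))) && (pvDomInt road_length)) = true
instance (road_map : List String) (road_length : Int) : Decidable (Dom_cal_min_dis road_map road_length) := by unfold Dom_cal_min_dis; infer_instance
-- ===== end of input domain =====

-- B replaces A's single stateful scan (running prev-letter/count with early return) by three
-- phases: a whole-prefix 'Z' check, a materialised list of (marker, dots-since-previous-marker)
-- pairs, and a reduction over adjacent pairs of that list (objective: alternative decomposition).

-- ===== PORT A =====
-- the for-i-in-range loop of A: k = iterations left, i = current index (so i runs 0,1,…,road_length-1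
-- without materialising the range); state = (min_dist, count, prev_letter); pyGet? none = IndexError (excluded by Pre_)
def calA_loop (road_map : List String) : Nat → Int → Int → Int → String → Int
  | 0, _, min_dist, _, _ => min_dist
  | k + 1, i, min_dist, count, prev_letter =>
    match PySem.List.pyGet? road_map i with
    | none => 0
    | some cell =>
      if PySem.Str.isIn "Z" cell then 0
      else
        let count1 := if cell = "." ∧ prev_letter ≠ "" then count + 1 else count
        if cell = "R" ∨ cell = "D" then
          if prev_letter = "" then calA_loop road_map k (i + 1) min_dist count1 cell
          else if prev_letter = cell then calA_loop road_map k (i + 1) min_dist 0 prev_letter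
          else calA_loop road_map k (i + 1) (if min_dist > count1 + 1 then count1 + 1 else min_dist) 0 cell
        else calA_loop road_map k (i + 1) min_dist count1 prev_letter

def cal_min_dis (road_map : List String) (road_length : Int) : Int :=
  calA_loop road_map road_length.toNat 0 99999999999 0 ""

-- ===== PORT B =====
-- markers pass of Source B: list of (letter, dots since previous marker)
def calB_markers : List String → Int → List (String × Int)
  | [], _ => []
  | c :: rest, dots =>
    if c = "R" ∨ c = "D" then (c, dots) :: calB_markers rest 0
    else if c = "." then calB_markers rest (dots + 1)
    else calB_markers rest dots

def cal_min_dis_alt (road_map : List String) (road_length : Int) : Int :=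
  let cells := road_map.take (max 0 road_length).toNat   -- road_map[:max(0, road_length)]
  if cells.any (fun c => PySem.Str.isIn "Z" c) then 0
  else
    let markers := calB_markers cells 0
    (List.zip markers markers.tail).foldl
      (fun best p => if p.1.1 ≠ p.2.1 ∧ p.2.2 + 1 < best then p.2.2 + 1 else best)
      99999999999

-- ===== PRECONDITION & SPEC =====
-- A raises IndexError exactly when road_length > len(road_map) and no cell of road_map
-- contains "Z" (a "Z" cell makes A return 0 before reaching an out-of-range index).
def Pre_cal_min_dis (road_map : List String) (road_length : Int) : Prop :=
  road_length ≤ road_map.length ∨ ∃ s ∈ road_map, PySem.Str.isIn "Z" s = true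
instance (road_map : List String) (road_length : Int) : Decidable (Pre_cal_min_dis road_map road_length) := by unfold Pre_cal_min_dis; infer_instance
def pvWitness_cal_min_dis : List String × Int := (["R", ".", "D"], 3)

def Spec_cal_min_dis (road_map : List String) (road_length : Int) (out : Int) : Prop := out = cal_min_dis_alt road_map road_length
instance (road_map : List String) (road_length : Int) (out : Int) : Decidable (Spec_cal_min_dis road_map road_length out) := by unfold Spec_cal_min_dis; infer_instance

-- ===== CLAIM (what is proved, stated in full; the proofs are below) =====
def Claim_equal_cal_min_dis : Prop := ∀ (road_map : List String) (road_length : Int), Dom_cal_min_dis road_map road_length → Pre_cal_min_dis road_map road_length → Spec_cal_min_dis road_map road_length (cal_min_dis road_map road_length)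
-- ===== LEMMAS AND PROOFS =====

-- A's loop at the level of the list of visited cells (proof helper)
def specA : List String → Int → Int → String → Int
  | [], best, _, _ => best
  | c :: rest, best, count, prev =>
    if PySem.Str.isIn "Z" c then 0
    else
      let count1 := if c = "." ∧ prev ≠ "" then count + 1 else count
      if c = "R" ∨ c = "D" then
        if prev = "" then specA rest best count1 c
        else if prev = c then specA rest best 0 prev
        else specA rest (if best > count1 + 1 then count1 + 1 else best) 0 c
      else specA rest best count1 prev

-- B's adjacent-pair reduction, in recursive form (proof helper)
def pairsRec : Int → List (String × Int) → Int
  | best, (l1, _) :: (l2, d2) :: rest =>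
      pairsRec (if l1 ≠ l2 ∧ d2 + 1 < best then d2 + 1 else best) ((l2, d2) :: rest)
  | best, _ => best

theorem zip_foldl_eq_pairsRec (m : List (String × Int)) (best : Int) :
    (List.zip m m.tail).foldl
      (fun best p => if p.1.1 ≠ p.2.1 ∧ p.2.2 + 1 < best then p.2.2 + 1 else best) best
    = pairsRec best m := by
  induction m generalizing best with
  | nil => rfl
  | cons a rest ih =>
    cases rest with
    | nil => rfl
    | cons b rest2 =>
      obtain ⟨l1, d1⟩ := a; obtain ⟨l2, d2⟩ := b
      simp only [List.tail_cons, List.zip_cons_cons, List.foldl_cons, pairsRec]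
      exact ih _

theorem specA_of_Z (cells : List String) (best count : Int) (prev : String)
    (h : ∃ c ∈ cells, PySem.Str.isIn "Z" c = true) :
    specA cells best count prev = 0 := by
  induction cells generalizing best count prev with
  | nil => simp at h
  | cons c rest ih =>
    simp only [List.mem_cons] at h
    simp only [specA]
    by_cases hz : PySem.Str.isIn "Z" c = true
    · rw [if_pos hz]
    · rw [if_neg hz]
      have h' : ∃ x ∈ rest, PySem.Str.isIn "Z" x = true := by
        rcases h with ⟨x, hx, hxz⟩
        rcases hx with rfl | hx
        · exact absurd hxz hz
        · exact ⟨x, hx, hxz⟩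
      split_ifs <;> exact ih _ _ _ h'

theorem pairsRec_markers (cells : List String) (d0 best count : Int) (prev : String)
    (hprev : prev ≠ "")
    (hnoZ : ∀ c ∈ cells, PySem.Str.isIn "Z" c = false) :
    pairsRec best ((prev, d0) :: calB_markers cells count) = specA cells best count prev := by
  induction cells generalizing d0 best count prev with
  | nil => rfl
  | cons c rest ih =>
    have hz : PySem.Str.isIn "Z" c = false := hnoZ c (by simp)
    have hnoZ' : ∀ x ∈ rest, PySem.Str.isIn "Z" x = false := fun x hx => hnoZ x (by simp [hx])
    simp only [specA, calB_markers]
    rw [if_neg (show ¬ PySem.Str.isIn "Z" c = true by simpa using hz)]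
    by_cases hm : c = "R" ∨ c = "D"
    · have hdot : ¬ (c = "." ∧ prev ≠ "") := by
        rcases hm with rfl | rfl <;> simp
      rw [if_pos hm, if_neg hdot, if_pos hm, if_neg hprev]
      by_cases he : prev = c
      · rw [if_pos he]
        subst he
        simp only [pairsRec]
        rw [if_neg (by simp)]
        exact ih count best 0 prev hprev hnoZ'
      · have hc : c ≠ "" := by rcases hm with rfl | rfl <;> simp
        rw [if_neg he]
        simp only [pairsRec]
        have : (if prev ≠ c ∧ count + 1 < best then count + 1 else best)
             = (if best > count + 1 then count + 1 else best) := by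
          simp [he, gt_iff_lt]
        rw [this]
        exact ih count _ 0 c hc hnoZ'
    · rw [if_neg hm, if_neg hm]
      by_cases hd : c = "."
      · rw [if_pos hd, if_pos (show c = "." ∧ prev ≠ "" from ⟨hd, hprev⟩)]
        exact ih d0 best (count + 1) prev hprev hnoZ'
      · rw [if_neg hd, if_neg (show ¬ (c = "." ∧ prev ≠ "") from fun h => hd h.1)]
        exact ih d0 best count prev hprev hnoZ'

theorem pairsRec_markers_base (cells : List String) (dots best : Int)
    (hnoZ : ∀ c ∈ cells, PySem.Str.isIn "Z" c = false) :
    pairsRec best (calB_markers cells dots) = specA cells best 0 "" := by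
  induction cells generalizing dots best with
  | nil => rfl
  | cons c rest ih =>
    have hz : PySem.Str.isIn "Z" c = false := hnoZ c (by simp)
    have hnoZ' : ∀ x ∈ rest, PySem.Str.isIn "Z" x = false := fun x hx => hnoZ x (by simp [hx])
    simp only [specA, calB_markers]
    rw [if_neg (show ¬ PySem.Str.isIn "Z" c = true by simpa using hz)]
    rw [if_neg (show ¬ (c = "." ∧ ("" : String) ≠ "") by simp)]
    by_cases hm : c = "R" ∨ c = "D"
    · have hc : c ≠ "" := by rcases hm with rfl | rfl <;> simp
      rw [if_pos hm, if_pos hm]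
      rw [if_pos trivial]
      exact pairsRec_markers rest dots best 0 c hc hnoZ'
    · rw [if_neg hm, if_neg hm]
      by_cases hd : c = "."
      · rw [if_pos hd]
        exact ih (dots + 1) best hnoZ'
      · rw [if_neg hd]
        exact ih dots best hnoZ'

theorem calA_loop_eq_specA (road_map : List String) :
    ∀ (k a : Nat) (best count : Int) (prev : String), a + k ≤ road_map.length →
    calA_loop road_map k (a : Int) best count prev
      = specA ((road_map.drop a).take k) best count prev := by
  intro k
  induction k with
  | zero =>
    intro a best count prev _
    simp [calA_loop, specA]
  | succ k ih =>
    intro a best count prev hlen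
    have ha : a < road_map.length := by omega
    have hcast : ((a : Int) + 1) = ((a + 1 : Nat) : Int) := by push_cast; ring
    have hget : PySem.List.pyGet? road_map (a : Int) = some road_map[a] := by
      rw [PySem.List.pyGet?_natCast road_map a, List.getElem?_eq_getElem ha]
    have hdrop : road_map.drop a = road_map[a] :: road_map.drop (a + 1) :=
      (List.getElem_cons_drop ha).symm
    simp only [calA_loop, hget, hcast, hdrop, List.take_succ_cons, specA]
    split_ifs <;> first | rfl | exact ih (a + 1) _ _ _ (by omega)

theorem calA_loop_Z (road_map : List String) :
    ∀ (k a : Nat) (best count : Int) (prev : String),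
    (∃ s ∈ road_map.drop a, PySem.Str.isIn "Z" s = true) →
    road_map.length ≤ a + k →
    calA_loop road_map k (a : Int) best count prev = 0 := by
  intro k
  induction k with
  | zero =>
    intro a best count prev hZ hlen
    rcases hZ with ⟨s, hs, _⟩
    rw [List.drop_eq_nil_of_le (by omega)] at hs
    simp at hs
  | succ k ih =>
    intro a best count prev hZ hlen
    have ha : a < road_map.length := by
      by_contra h
      rcases hZ with ⟨s, hs, _⟩
      rw [List.drop_eq_nil_of_le (by omega)] at hs
      simp at hs
    have hcast : ((a : Int) + 1) = ((a + 1 : Nat) : Int) := by push_cast; ring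
    have hget : PySem.List.pyGet? road_map (a : Int) = some road_map[a] := by
      rw [PySem.List.pyGet?_natCast road_map a, List.getElem?_eq_getElem ha]
    simp only [calA_loop, hget, hcast]
    by_cases hz : PySem.Str.isIn "Z" road_map[a] = true
    · rw [if_pos hz]
    · have hZ' : ∃ s ∈ road_map.drop (a + 1), PySem.Str.isIn "Z" s = true := by
        rcases hZ with ⟨s, hs, hsz⟩
        rw [(List.getElem_cons_drop ha).symm] at hs
        rcases List.mem_cons.mp hs with rfl | hs
        · exact absurd hsz hz
        · exact ⟨s, hs, hsz⟩
      rw [if_neg hz]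
      split_ifs <;> exact ih (a + 1) _ _ _ hZ' (by omega)

-- ===== VERDICT (by name: the statement is the Claim_ definition above) =====
theorem cal_min_dis_spec : Claim_equal_cal_min_dis := by
  intro road_map road_length _ hpre
  unfold Spec_cal_min_dis cal_min_dis cal_min_dis_alt
  by_cases hle : road_length ≤ (road_map.length : Int)
  · by_cases hpos : road_length ≤ 0
    · have h0 : (max 0 road_length).toNat = 0 := by
        have : max 0 road_length = 0 := max_eq_left hpos
        simp [this]
      have h0' : road_length.toNat = 0 := by omega
      simp [h0, h0', calA_loop, calB_markers]
    · push Not at hpos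
      set n := road_length.toNat with hn
      have hrl : road_length = (n : Int) := by omega
      have hmax : (max 0 road_length).toNat = n := by omega
      have hA : calA_loop road_map road_length.toNat 0 99999999999 0 ""
          = specA (road_map.take n) 99999999999 0 "" := by
        have := calA_loop_eq_specA road_map n 0 99999999999 0 "" (by omega)
        simpa using this
      rw [hA, hmax]
      by_cases hz : (road_map.take n).any (fun c => PySem.Str.isIn "Z" c)
      · rw [if_pos hz]
        exact specA_of_Z _ _ _ _ (by simpa using hz)
      · rw [if_neg hz]
        have hnoZ : ∀ c ∈ road_map.take n, PySem.Str.isIn "Z" c = false := by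
          simpa using hz
        rw [zip_foldl_eq_pairsRec]
        exact (pairsRec_markers_base (road_map.take n) 0 99999999999 hnoZ).symm
  · push Not at hle
    have hZ : ∃ s ∈ road_map, PySem.Str.isIn "Z" s = true := by
      rcases hpre with h | h
      · omega
      · exact h
    set n := road_length.toNat with hn
    have hrl : road_length = (n : Int) := by omega
    have hA : calA_loop road_map road_length.toNat 0 99999999999 0 "" = 0 := by
      have := calA_loop_Z road_map n 0 99999999999 0 "" (by simpa using hZ) (by omega)
      simpa using this
    rw [hA]
    have hmax : (max 0 road_length).toNat = n := by omega
    have htake : road_map.take (max 0 road_length).toNat = road_map := by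
      rw [hmax]; exact List.take_of_length_le (by omega)
    rw [htake, if_pos (by simpa using hZ)]
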